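-- pv_equiv track=rewrite | github.com/garciagorkauni/DAW2-ZIG | Zailtasun erdiko ariketak/04_Positiboak_ordenatzen.py | positiboak_ordenatu
-- ===== SOURCE A (Python) =====
-- def positiboak_ordenatu  (num_list):
--     # Safe position and value if is =< 0
--     non_positive = {}
--     for position in range(0,len(num_list)):
--         if num_list[position] <= 0:
--             non_positive[position] = num_list[position]
--
--     # Sort rest of positive values
--     for num in non_positive.values():
--         num_list.remove(num)
--     num_list = sorted(num_list)
--
--     # Insert first nums
--     for position, num in non_positive.items():
--         num_list.insert(position, num)
--
--     # Return the final list
--     return num_list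
-- ===== SOURCE B (Python) =====
-- def positiboak_ordenatu(num_list):
--     # One pass: non-positives stay in place, positives are drawn in order
--     # from a pre-sorted iterator.  (Return value only: unlike A, this does
--     # not mutate the caller's list.)
--     positives = iter(sorted(x for x in num_list if x > 0))
--     return [x if x <= 0 else next(positives) for x in num_list]
-- ===== Notes on version B (the rewrite author's own statement) =====
-- stated objective: simpler
-- what changed: A saves non-positives with their indices in a dict, removes them one by one with list.remove, sorts the remainder and re-inserts each saved value with list.insert; B builds the sorted positives once and does a single merge pass over the original list, drawing the next sorted positive for each positive slot (return value only: A also mutates its argument list, B does not).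
import Mathlib
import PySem

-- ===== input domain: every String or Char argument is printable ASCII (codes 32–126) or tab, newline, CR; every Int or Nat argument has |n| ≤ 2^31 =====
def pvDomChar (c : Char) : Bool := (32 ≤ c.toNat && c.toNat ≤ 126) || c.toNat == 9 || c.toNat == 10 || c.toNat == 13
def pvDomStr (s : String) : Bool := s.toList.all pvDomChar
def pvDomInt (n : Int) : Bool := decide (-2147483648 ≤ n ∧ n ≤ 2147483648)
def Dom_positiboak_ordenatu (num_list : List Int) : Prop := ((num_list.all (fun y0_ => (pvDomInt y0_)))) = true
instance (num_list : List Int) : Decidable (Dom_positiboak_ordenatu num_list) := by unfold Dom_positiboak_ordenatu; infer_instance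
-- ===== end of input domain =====

-- B replaces A's dict-of-saved-positions + remove/insert shuffle by one pass that merges
-- the pre-sorted positives back over the non-positives (simpler; return value only:
-- A mutates its argument list — removes the non-positives — while B leaves it untouched).

-- ===== PORT A =====
-- literal transliteration of Source A; `(remove? …).getD acc` covers the ValueError branch,
-- which Python never reaches here (each removed value was collected from the list itself)
def positiboak_ordenatu (num_list : List Int) : List Int :=
  let non_positive : PySem.Dict Int Int :=
    (PySem.List.pyRange 0 (num_list.length : Int) 1).foldl
      (fun d position =>
        if PySem.List.pyGetD num_list position 0 ≤ 0 then
          d.insert position (PySem.List.pyGetD num_list position 0)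
        else d)
      PySem.Dict.empty
  let after_remove :=
    non_positive.values.foldl (fun acc num => (PySem.List.remove? acc num).getD acc) num_list
  let sorted_list := PySem.List.sorted after_remove (fun x => x) false
  non_positive.items.foldl (fun acc p => PySem.List.insert acc p.1 p.2) sorted_list

-- ===== PORT B =====
-- the comprehension of Source B: each non-positive passes through, each positive is replaced
-- by the next element of the sorted-positives iterator (here: the head of the list `ps`);
-- the `[]` branch is Python's unreachable StopIteration
def pvFill (l ps : List Int) : List Int :=
  match l, ps with
  | [], _ => []
  | x :: xs, ps =>
      if x ≤ 0 then x :: pvFill xs ps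
      else
        match ps with
        | p :: ps' => p :: pvFill xs ps'
        | [] => pvFill xs []

def positiboak_ordenatu_alt (num_list : List Int) : List Int :=
  pvFill num_list
    (PySem.List.sorted (num_list.filter (fun x => decide (0 < x))) (fun x => x) false)

-- ===== PRECONDITION & SPEC =====
def Spec_positiboak_ordenatu (num_list : List Int) (out : List Int) : Prop := out = positiboak_ordenatu_alt num_list
instance (num_list : List Int) (out : List Int) : Decidable (Spec_positiboak_ordenatu num_list out) := by unfold Spec_positiboak_ordenatu; infer_instance

-- ===== CLAIM (what is proved, stated in full; the proofs are below) =====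
def Claim_equal_positiboak_ordenatu : Prop := ∀ (num_list : List Int), Dom_positiboak_ordenatu num_list → Spec_positiboak_ordenatu num_list (positiboak_ordenatu num_list)

-- ===== LEMMAS AND PROOFS =====

-- the saved-positions dict, as an explicit list of (index, value) pairs
def pvNP (l : List Int) : List (Int × Int) :=
  (PySem.List.enumerate l 0).filter (fun p => decide (p.2 ≤ 0))

lemma pvDict_items (l : List Int) :
    ((PySem.List.pyRange 0 (l.length : Int) 1).foldl
      (fun d position =>
        if PySem.List.pyGetD l position 0 ≤ 0 then
          d.insert position (PySem.List.pyGetD l position 0)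
        else d)
      (PySem.Dict.empty : PySem.Dict Int Int)).items = pvNP l := by
  have henum := PySem.List.enumerate_eq_map_pyRange (xs := l) (d := 0)
  have h1 : (PySem.List.pyRange 0 (l.length : Int) 1).foldl
      (fun d position =>
        if PySem.List.pyGetD l position 0 ≤ 0 then
          d.insert position (PySem.List.pyGetD l position 0)
        else d)
      (PySem.Dict.empty : PySem.Dict Int Int)
    = (PySem.List.enumerate l 0).foldl
        (fun d p => if p.2 ≤ 0 then d.insert p.1 p.2 else d) PySem.Dict.empty := by
    rw [henum, List.foldl_map]
    rfl
  have h2 := PySem.List.foldl_ite_eq_foldl_filter (p := fun p : Int × Int => p.2 ≤ 0)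
    (f := fun (d : PySem.Dict Int Int) (p : Int × Int) => d.insert p.1 p.2)
    (l := PySem.List.enumerate l 0) (init := (PySem.Dict.empty : PySem.Dict Int Int))
  rw [h1, h2]
  have hnd : (((PySem.List.enumerate l 0).filter (fun p => decide (p.2 ≤ 0))).map
      (fun p : Int × Int => p.1)).Nodup := by
    have hp : ((PySem.List.enumerate l 0).filter (fun p => decide (p.2 ≤ 0))).Pairwise
        (fun p q => p.1 < q.1) := (PySem.List.pairwise_lt_enumerate l 0).sublist
        List.filter_sublist
    have hm := hp.map (f := fun p : Int × Int => p.1)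
      (S := fun a b => a < b) (by intro a b h; exact h)
    exact (hm.imp (by intro a b h; omega)).nodup
  have h3 := PySem.Dict.items_foldl_insert_fresh
    (l := (PySem.List.enumerate l 0).filter (fun p => decide (p.2 ≤ 0)))
    (k := fun p : Int × Int => p.1) (v := fun p : Int × Int => p.2)
    (d := (PySem.Dict.empty : PySem.Dict Int Int))
    (by intro a _; simp) hnd
  rw [h3]
  simp [pvNP, PySem.Dict.empty]

lemma pvEnumerate_shift (l : List Int) (s : Int) :
    PySem.List.enumerate l (s + 1)
      = (PySem.List.enumerate l s).map (fun p => (p.1 + 1, p.2)) := by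
  induction l generalizing s with
  | nil => rfl
  | cons x xs ih => simp [PySem.List.enumerate_cons, ih]

lemma pvEnumerate_one (l : List Int) :
    PySem.List.enumerate l 1
      = (PySem.List.enumerate l 0).map (fun p => (p.1 + 1, p.2)) := by
  have := pvEnumerate_shift l 0
  simpa using this

lemma pvNP_cons (x : Int) (xs : List Int) :
    pvNP (x :: xs)
      = (if x ≤ 0 then [((0 : Int), x)] else [])
        ++ (pvNP xs).map (fun p => (p.1 + 1, p.2)) := by
  simp only [pvNP, PySem.List.enumerate_cons, zero_add, pvEnumerate_one,
    List.filter_cons, List.filter_map]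
  split_ifs <;> simp_all [Function.comp_def]

lemma pvNP_fst_nonneg (l : List Int) : ∀ p ∈ pvNP l, 0 ≤ p.1 := by
  intro p hp
  have := (List.mem_filter.mp hp).1
  rcases (PySem.List.mem_enumerate_iff _ _ _).mp this with ⟨k, hk, rfl⟩
  simp

-- removing a value absent from the head commutes with the head
lemma pvRemoveFold_cons (x : Int) (xs : List Int) (vs : List Int)
    (h : ∀ v ∈ vs, v ≠ x) :
    vs.foldl (fun acc v => (PySem.List.remove? acc v).getD acc) (x :: xs)
      = x :: vs.foldl (fun acc v => (PySem.List.remove? acc v).getD acc) xs := by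
  induction vs generalizing xs with
  | nil => rfl
  | cons v vs ih =>
      have hvx : x ≠ v := fun he => (h v (by simp)) he.symm
      simp only [List.foldl_cons]
      rw [PySem.List.remove?_cons_of_ne _ hvx]
      cases hrem : PySem.List.remove? xs v with
      | none => simpa using ih xs (fun w hw => h w (by simp [hw]))
      | some t => simpa using ih t (fun w hw => h w (by simp [hw]))

-- A's remove loop turns the list into its positives, in original order
lemma pvRemoveLoop (l : List Int) :
    ((pvNP l).map (·.2)).foldl (fun acc v => (PySem.List.remove? acc v).getD acc) l
      = l.filter (fun x => decide (0 < x)) := by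
  induction l with
  | nil => rfl
  | cons x xs ih =>
      rw [pvNP_cons]
      by_cases hx : x ≤ 0
      · simp only [if_pos hx, List.map_cons, List.map_map, List.singleton_append, List.foldl_cons, PySem.List.remove?_cons_self,
          Option.getD_some]
        have hmap : (pvNP xs).map ((·.2) ∘ fun p => (p.1 + 1, p.2)) = (pvNP xs).map (·.2) := by
          simp [Function.comp_def]
        rw [hmap, ih]
        simp [show ¬ (0:Int) < x by omega]
      · simp only [if_neg hx, List.nil_append, List.map_map]
        have hmap : (pvNP xs).map ((·.2) ∘ fun p => (p.1 + 1, p.2)) = (pvNP xs).map (·.2) := by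
          simp [Function.comp_def]
        rw [hmap, pvRemoveFold_cons x xs _ ?hne, ih]
        · simp [show (0:Int) < x by omega]
        case hne =>
          intro v hv
          rcases List.mem_map.mp hv with ⟨p, hp, rfl⟩
          have := (List.mem_filter.mp hp).2
          simp at this
          omega

lemma pvInsert_succ (a : Int) (acc : List Int) (i : Int) (h : 0 ≤ i) (v : Int) :
    PySem.List.insert (a :: acc) (i + 1) v = a :: PySem.List.insert acc i v := by
  simp only [PySem.List.insert, PySem.List.sliceIndices]
  have h1 : ¬ ((1:Int) < 0) := by norm_num
  have hlt : ¬ (i + 1 < 0) := by omega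
  have hlt2 : ¬ (i < 0) := by omega
  simp only [if_neg h1, if_neg hlt, if_neg hlt2, List.length_cons]
  have h2 : (min (i + 1) ((acc.length : Int) + 1)).toNat
      = (min i (acc.length : Int)).toNat + 1 := by omega
  push_cast
  rw [h2, List.take_succ_cons, List.drop_succ_cons]
  simp

-- inserting at shifted positions under a fixed head
lemma pvInsertFold_shift (items : List (Int × Int)) (h : ∀ p ∈ items, 0 ≤ p.1)
    (a : Int) (acc : List Int) :
    (items.map (fun p => (p.1 + 1, p.2))).foldl
        (fun acc p => PySem.List.insert acc p.1 p.2) (a :: acc)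
      = a :: items.foldl (fun acc p => PySem.List.insert acc p.1 p.2) acc := by
  induction items generalizing acc with
  | nil => rfl
  | cons q qs ih =>
      simp only [List.map_cons, List.foldl_cons]
      rw [pvInsert_succ a acc q.1 (h q (by simp)) q.2]
      exact ih (fun p hp => h p (by simp [hp])) _

-- A's insert-back loop is exactly B's merge pass
lemma pvInsertLoop (l : List Int) : ∀ ps : List Int,
    ps.length = (l.filter (fun x => decide (0 < x))).length →
    (pvNP l).foldl (fun acc p => PySem.List.insert acc p.1 p.2) ps = pvFill l ps := by
  induction l with
  | nil =>
      intro ps h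
      have hps : ps = [] := List.length_eq_zero_iff.mp (by simpa using h)
      subst hps
      rfl
  | cons x xs ih =>
      intro ps hlen
      rw [pvNP_cons]
      by_cases hx : x ≤ 0
      · simp only [if_pos hx, List.singleton_append, List.foldl_cons,
          PySem.List.insert_zero]
        rw [pvInsertFold_shift _ (pvNP_fst_nonneg xs) x ps]
        have hlen' : ps.length = (xs.filter (fun x => decide (0 < x))).length := by
          simpa [List.filter_cons, show ¬ (0:Int) < x by omega] using hlen
        rw [ih ps hlen']
        simp [pvFill, hx]
      · simp only [if_neg hx, List.nil_append]
        have hx' : (0:Int) < x := by omega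
        have : ps.length = (xs.filter (fun x => decide (0 < x))).length + 1 := by
          simpa [List.filter_cons, hx'] using hlen
        obtain ⟨p₀, ps', rfl⟩ : ∃ p₀ ps', ps = p₀ :: ps' := by
          cases ps with
          | nil => simp at this
          | cons a t => exact ⟨a, t, rfl⟩
        rw [pvInsertFold_shift _ (pvNP_fst_nonneg xs) p₀ ps']
        rw [ih ps' (by simpa using this)]
        simp [pvFill, hx]

-- ===== VERDICT (by name: the statement is the Claim_ definition above) =====
theorem pvMain (l : List Int) : positiboak_ordenatu l = positiboak_ordenatu_alt l := by
  have hD : ((PySem.List.pyRange 0 (l.length : Int) 1).foldl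
      (fun d position =>
        if PySem.List.pyGetD l position 0 ≤ 0 then
          d.insert position (PySem.List.pyGetD l position 0)
        else d)
      (PySem.Dict.empty : PySem.Dict Int Int)) = PySem.Dict.mk (pvNP l) :=
    PySem.Dict.ext (pvDict_items l)
  unfold positiboak_ordenatu positiboak_ordenatu_alt
  simp only [hD]
  have hv : ({ items := pvNP l } : PySem.Dict Int Int).values = (pvNP l).map (·.2) := rfl
  rw [hv, pvRemoveLoop l]
  exact pvInsertLoop l _ (by simp [PySem.List.length_sorted])

theorem positiboak_ordenatu_spec : Claim_equal_positiboak_ordenatu := by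
  intro l _
  exact pvMain l
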